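-- pv_equiv track=rewrite | github.com/Ridealist/CodingTest | 완전탐색/모의고사.py | solution
-- ===== SOURCE A (Python) =====
-- def solution(answers):
--     first = []
--     second = []
--     third = []
--     for i in range(len(answers)):
--         first.append(i % 5 + 1)
--         if i % 2 == 0:
--             second.append(2)
--         elif i % 2 == 1:
--             if i % 8 == 5:
--                 second.append(4)
--             elif i % 8 == 7:
--                 second.append(5)
--             else:
--                 second.append(i % 8)
--         if (i % 10) // 2 == 0:
--             third.append(3)
--         elif (i % 10) // 2 == 1:
--             third.append(1)
--         elif (i % 10) // 2 == 2:
--             third.append(2)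
--         elif (i % 10) // 2 == 3:
--             third.append(4)
--         elif (i % 10) // 2 == 4:
--             third.append(5)
--
--     f_cnt = 0
--     s_cnt = 0
--     t_cnt = 0
--     for i in range(len(answers)):
--         if answers[i] == first[i]:
--             f_cnt += 1
--         if answers[i] == second[i]:
--             s_cnt += 1
--         if answers[i] == third[i]:
--             t_cnt += 1
--
--     maximum = max([f_cnt, s_cnt, t_cnt])
--
--     answer = []
--     if maximum == f_cnt:
--         answer.append(1)
--     if maximum == s_cnt:
--         answer.append(2)
--     if maximum == t_cnt:
--         answer.append(3)
--
--     answer = sorted(answer)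
--     return answer
-- ===== SOURCE B (Python) =====
-- def _score(hist, pattern):
--     return sum(hist.get((r, pattern[r % len(pattern)]), 0) for r in range(40))
--
--
-- def solution(answers):
--     # Histogram over (index mod 40, answer): 40 = lcm of the three pattern
--     # periods (5, 8, 10), so a residue mod 40 determines every pattern's guess.
--     hist = {}
--     for i, a in enumerate(answers):
--         key = (i % 40, a)
--         hist[key] = hist.get(key, 0) + 1
--     c1 = _score(hist, [1, 2, 3, 4, 5])
--     c2 = _score(hist, [2, 1, 2, 3, 2, 4, 2, 5])
--     c3 = _score(hist, [3, 3, 1, 1, 2, 2, 4, 4, 5, 5])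
--     best = max(c1, c2, c3)
--     return [k for k, c in enumerate((c1, c2, c3), 1) if c == best]
-- ===== Notes on version B (the rewrite author's own statement) =====
-- stated objective: alternative
-- what changed: B never compares an answer against a pattern while scanning: one pass builds a histogram dict keyed by (index mod 40, answer) (40 = lcm of the pattern periods), and each student's score is then a fixed 40-term sum of histogram lookups at (residue, that pattern's guess at the residue), replacing A's build-three-pattern-lists pass and its per-element triple comparison loop.
import Mathlib
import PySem

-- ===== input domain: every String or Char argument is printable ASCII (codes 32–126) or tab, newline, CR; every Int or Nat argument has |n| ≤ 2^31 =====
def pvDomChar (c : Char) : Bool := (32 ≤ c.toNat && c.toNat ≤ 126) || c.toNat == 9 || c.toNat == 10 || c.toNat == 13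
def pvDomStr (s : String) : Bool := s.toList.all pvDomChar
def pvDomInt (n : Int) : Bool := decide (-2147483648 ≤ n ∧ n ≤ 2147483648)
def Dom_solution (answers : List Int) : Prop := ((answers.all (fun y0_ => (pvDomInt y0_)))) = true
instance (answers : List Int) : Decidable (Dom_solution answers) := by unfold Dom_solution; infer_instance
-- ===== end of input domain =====

-- B replaces A's build-pattern-lists-then-compare passes by a different algorithm: one pass builds a
-- histogram dict keyed by (index mod 40, answer) (40 = lcm of the pattern periods), and each score is
-- a fixed 40-term sum of histogram lookups — no per-element pattern comparison (objective: alternative).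

-- ===== PORT A =====
def solution (answers : List Int) : List Int :=
  let n : Int := (answers.length : Int)
  let lists := (PySem.List.pyRange 0 n).foldl (fun (st : List Int × List Int × List Int) i =>
    let first := st.1 ++ [PySem.Int.mod i 5 + 1]
    let second :=
      if PySem.Int.mod i 2 = 0 then st.2.1 ++ [2]
      else if PySem.Int.mod i 2 = 1 then
        (if PySem.Int.mod i 8 = 5 then st.2.1 ++ [4]
         else if PySem.Int.mod i 8 = 7 then st.2.1 ++ [5]
         else st.2.1 ++ [PySem.Int.mod i 8])
      else st.2.1
    let third :=
      if PySem.Int.floordiv (PySem.Int.mod i 10) 2 = 0 then st.2.2 ++ [3]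
      else if PySem.Int.floordiv (PySem.Int.mod i 10) 2 = 1 then st.2.2 ++ [1]
      else if PySem.Int.floordiv (PySem.Int.mod i 10) 2 = 2 then st.2.2 ++ [2]
      else if PySem.Int.floordiv (PySem.Int.mod i 10) 2 = 3 then st.2.2 ++ [4]
      else if PySem.Int.floordiv (PySem.Int.mod i 10) 2 = 4 then st.2.2 ++ [5]
      else st.2.2
    (first, second, third)) (([] : List Int), ([] : List Int), ([] : List Int))
  let cnts := (PySem.List.pyRange 0 n).foldl (fun (c : Int × Int × Int) i =>
    let f := if PySem.List.pyGetD answers i 0 = PySem.List.pyGetD lists.1 i 0 then c.1 + 1 else c.1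
    let s := if PySem.List.pyGetD answers i 0 = PySem.List.pyGetD lists.2.1 i 0 then c.2.1 + 1 else c.2.1
    let t := if PySem.List.pyGetD answers i 0 = PySem.List.pyGetD lists.2.2 i 0 then c.2.2 + 1 else c.2.2
    (f, s, t)) ((0 : Int), (0 : Int), (0 : Int))
  let maximum := max (max cnts.1 cnts.2.1) cnts.2.2
  let answer := (if maximum = cnts.1 then [(1 : Int)] else []) ++
                (if maximum = cnts.2.1 then [(2 : Int)] else []) ++
                (if maximum = cnts.2.2 then [(3 : Int)] else [])
  PySem.List.sorted answer (fun x => x)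

-- ===== PORT B =====
-- helper _score(hist, pattern): sum of 40 histogram lookups, one per residue mod 40
def pvScore (hist : PySem.Dict (Int × Int) Int) (pattern : List Int) : Int :=
  ((PySem.List.pyRange 0 40).map (fun r =>
    hist.getD (r, PySem.List.pyGetD pattern (PySem.Int.mod r (pattern.length : Int)) 0) 0)).sum

def solution_alt (answers : List Int) : List Int :=
  let hist := (PySem.List.enumerate answers).foldl
    (fun (d : PySem.Dict (Int × Int) Int) p =>
      d.insert (PySem.Int.mod p.1 40, p.2) (d.getD (PySem.Int.mod p.1 40, p.2) 0 + 1))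
    PySem.Dict.empty
  let c1 := pvScore hist [1, 2, 3, 4, 5]
  let c2 := pvScore hist [2, 1, 2, 3, 2, 4, 2, 5]
  let c3 := pvScore hist [3, 3, 1, 1, 2, 2, 4, 4, 5, 5]
  let best := max (max c1 c2) c3
  ((PySem.List.enumerate [c1, c2, c3] 1).filter (fun p => p.2 = best)).map (·.1)

-- ===== PRECONDITION & SPEC =====
def Spec_solution (answers : List Int) (out : List Int) : Prop := out = solution_alt answers
instance (answers : List Int) (out : List Int) : Decidable (Spec_solution answers out) := by unfold Spec_solution; infer_instance

-- ===== CLAIM (what is proved, stated in full; the proofs are below) =====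
def Claim_equal_solution : Prop := ∀ (answers : List Int), Dom_solution answers → Spec_solution answers (solution answers)

-- ===== LEMMAS AND PROOFS =====

-- A's per-index pattern values, as total functions of the index.
def pvG1 (i : Int) : Int := PySem.Int.mod i 5 + 1
def pvG2 (i : Int) : Int :=
  if PySem.Int.mod i 2 = 0 then 2
  else if PySem.Int.mod i 2 = 1 then
    (if PySem.Int.mod i 8 = 5 then 4
     else if PySem.Int.mod i 8 = 7 then 5
     else PySem.Int.mod i 8)
  else 0
def pvG3 (i : Int) : Int :=
  if PySem.Int.floordiv (PySem.Int.mod i 10) 2 = 0 then 3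
  else if PySem.Int.floordiv (PySem.Int.mod i 10) 2 = 1 then 1
  else if PySem.Int.floordiv (PySem.Int.mod i 10) 2 = 2 then 2
  else if PySem.Int.floordiv (PySem.Int.mod i 10) 2 = 3 then 4
  else if PySem.Int.floordiv (PySem.Int.mod i 10) 2 = 4 then 5
  else 0

-- one step of A's build loop always appends exactly one element to each list
lemma pvBuildStep (xs ys zs : List Int) (i : Int) :
    (fun (st : List Int × List Int × List Int) i =>
      let first := st.1 ++ [PySem.Int.mod i 5 + 1]
      let second :=
        if PySem.Int.mod i 2 = 0 then st.2.1 ++ [2]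
        else if PySem.Int.mod i 2 = 1 then
          (if PySem.Int.mod i 8 = 5 then st.2.1 ++ [4]
           else if PySem.Int.mod i 8 = 7 then st.2.1 ++ [5]
           else st.2.1 ++ [PySem.Int.mod i 8])
        else st.2.1
      let third :=
        if PySem.Int.floordiv (PySem.Int.mod i 10) 2 = 0 then st.2.2 ++ [3]
        else if PySem.Int.floordiv (PySem.Int.mod i 10) 2 = 1 then st.2.2 ++ [1]
        else if PySem.Int.floordiv (PySem.Int.mod i 10) 2 = 2 then st.2.2 ++ [2]
        else if PySem.Int.floordiv (PySem.Int.mod i 10) 2 = 3 then st.2.2 ++ [4]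
        else if PySem.Int.floordiv (PySem.Int.mod i 10) 2 = 4 then st.2.2 ++ [5]
        else st.2.2
      (first, second, third)) (xs, ys, zs) i
    = (xs ++ [pvG1 i], ys ++ [pvG2 i], zs ++ [pvG3 i]) := by
  have h2 : PySem.Int.mod i 2 = i % 2 := PySem.Int.mod_eq_emod_of_pos (by norm_num)
  have h10 : PySem.Int.mod i 10 = i % 10 := PySem.Int.mod_eq_emod_of_pos (by norm_num)
  have hd : PySem.Int.floordiv (PySem.Int.mod i 10) 2 = i % 10 / 2 := by
    rw [h10]; exact PySem.Int.floordiv_eq_ediv_of_pos (by norm_num)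
  have hb2 : 0 ≤ i % 2 ∧ i % 2 < 2 := by omega
  have hb10 : 0 ≤ i % 10 / 2 ∧ i % 10 / 2 < 5 := by omega
  unfold pvG1 pvG2 pvG3
  simp only [h2, hd]
  split_ifs <;> simp_all <;> omega

lemma pvBuild (d : Nat) : ∀ (a b : Int), (b - a).toNat = d → ∀ (xs ys zs : List Int),
    (PySem.List.pyRange a b).foldl (fun (st : List Int × List Int × List Int) i =>
      let first := st.1 ++ [PySem.Int.mod i 5 + 1]
      let second :=
        if PySem.Int.mod i 2 = 0 then st.2.1 ++ [2]
        else if PySem.Int.mod i 2 = 1 then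
          (if PySem.Int.mod i 8 = 5 then st.2.1 ++ [4]
           else if PySem.Int.mod i 8 = 7 then st.2.1 ++ [5]
           else st.2.1 ++ [PySem.Int.mod i 8])
        else st.2.1
      let third :=
        if PySem.Int.floordiv (PySem.Int.mod i 10) 2 = 0 then st.2.2 ++ [3]
        else if PySem.Int.floordiv (PySem.Int.mod i 10) 2 = 1 then st.2.2 ++ [1]
        else if PySem.Int.floordiv (PySem.Int.mod i 10) 2 = 2 then st.2.2 ++ [2]
        else if PySem.Int.floordiv (PySem.Int.mod i 10) 2 = 3 then st.2.2 ++ [4]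
        else if PySem.Int.floordiv (PySem.Int.mod i 10) 2 = 4 then st.2.2 ++ [5]
        else st.2.2
      (first, second, third)) (xs, ys, zs)
    = (xs ++ (PySem.List.pyRange a b).map pvG1,
       ys ++ (PySem.List.pyRange a b).map pvG2,
       zs ++ (PySem.List.pyRange a b).map pvG3) := by
  induction d with
  | zero =>
    intro a b hd xs ys zs
    rw [PySem.List.pyRange_one_eq_nil (by omega)]
    simp
  | succ d ih =>
    intro a b hd xs ys zs
    have hab : a < b := by omega
    rw [PySem.List.pyRange_one_cons hab]
    have hstep := pvBuildStep xs ys zs a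
    dsimp only at hstep
    rw [List.foldl_cons]
    dsimp only
    rw [hstep, ih (a + 1) b (by omega)]
    simp

-- A's decision-tree values coincide with the cyclic-table lookups of period 5/8/10
lemma pvT1 (i : Int) : pvG1 i = PySem.List.pyGetD [1, 2, 3, 4, 5] (PySem.Int.mod i 5) 0 := by
  have h5 : PySem.Int.mod i 5 = i % 5 := PySem.Int.mod_eq_emod_of_pos (by norm_num)
  have hb : i % 5 = 0 ∨ i % 5 = 1 ∨ i % 5 = 2 ∨ i % 5 = 3 ∨ i % 5 = 4 := by omega
  unfold pvG1
  rcases hb with h|h|h|h|h <;> rw [h5, h] <;> decide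
lemma pvT2 (i : Int) : pvG2 i = PySem.List.pyGetD [2, 1, 2, 3, 2, 4, 2, 5] (PySem.Int.mod i 8) 0 := by
  have h2 : PySem.Int.mod i 2 = i % 2 := PySem.Int.mod_eq_emod_of_pos (by norm_num)
  have h8 : PySem.Int.mod i 8 = i % 8 := PySem.Int.mod_eq_emod_of_pos (by norm_num)
  have hb : i % 8 = 0 ∨ i % 8 = 1 ∨ i % 8 = 2 ∨ i % 8 = 3 ∨ i % 8 = 4 ∨ i % 8 = 5 ∨
      i % 8 = 6 ∨ i % 8 = 7 := by omega
  unfold pvG2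
  rcases hb with h|h|h|h|h|h|h|h <;> rw [h2, h8, h] <;>
    first
      | (rw [show i % 2 = 0 from by omega]; decide)
      | (rw [show i % 2 = 1 from by omega]; decide)
lemma pvT3 (i : Int) : pvG3 i = PySem.List.pyGetD [3, 3, 1, 1, 2, 2, 4, 4, 5, 5] (PySem.Int.mod i 10) 0 := by
  have h10 : PySem.Int.mod i 10 = i % 10 := PySem.Int.mod_eq_emod_of_pos (by norm_num)
  have hb : i % 10 = 0 ∨ i % 10 = 1 ∨ i % 10 = 2 ∨ i % 10 = 3 ∨ i % 10 = 4 ∨ i % 10 = 5 ∨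
      i % 10 = 6 ∨ i % 10 = 7 ∨ i % 10 = 8 ∨ i % 10 = 9 := by omega
  unfold pvG3
  rcases hb with h|h|h|h|h|h|h|h|h|h <;> rw [h10, h] <;>
    rw [PySem.Int.floordiv_eq_ediv_of_pos (by norm_num)] <;> decide

-- an index loop 'for i in range(s, s+len(xs)): … xs[i-s] …' is a loop over enumerate(xs, s)
lemma pvEnumFold {σ : Type} (xs : List Int) : ∀ (s : Int) (F : σ → Int × Int → σ) (acc : σ),
    (PySem.List.pyRange s (s + xs.length)).foldl
      (fun c i => F c (i, PySem.List.pyGetD xs (i - s) 0)) acc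
    = (PySem.List.enumerate xs s).foldl F acc := by
  induction xs with
  | nil =>
    intro s F acc
    rw [PySem.List.pyRange_one_eq_nil (by simp)]
    simp [PySem.List.enumerate]
  | cons x xs ih =>
    intro s F acc
    rw [PySem.List.pyRange_one_cons (by push_cast [List.length_cons]; omega),
      PySem.List.enumerate_cons]
    simp only [List.foldl_cons, sub_self]
    rw [PySem.List.pyGetD_ofNat', List.getD_cons_zero]
    rw [show s + ((x :: xs).length : Int) = (s + 1) + (xs.length : Int) from
      by push_cast [List.length_cons]; ring]
    rw [PySem.List.foldl_congr_mem _ _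
      (fun c i => F c (i, PySem.List.pyGetD xs (i - (s + 1)) 0)) _ ?_]
    · exact ih (s + 1) F _
    · intro acc' i hi
      have hs : s + 1 ≤ i := ((PySem.List.mem_pyRange_one).1 hi).1
      have h1 : PySem.List.pyGetD (x :: xs) (i - s) 0 = PySem.List.pyGetD xs (i - (s + 1)) 0 := by
        rw [PySem.List.pyGetD_of_nonneg _ _ (by omega), PySem.List.pyGetD_of_nonneg _ _ (by omega),
          show (i - s).toNat = (i - (s + 1)).toNat + 1 from by omega, List.getD_cons_succ]
      rw [h1]

-- a 40-term indicator sum over range(40) collapses to a single indicator (the residue selects one term)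
lemma pvSumInd (g : Int → Int) (m v : Int) (h0 : 0 ≤ m) (h40 : m < 40) :
    ((PySem.List.pyRange 0 40).map (fun r => if (m, v) = (r, g r) then (1 : Int) else 0)).sum
    = if v = g m then 1 else 0 := by
  rw [PySem.List.pyRange_one_append 0 m 40 h0 (by omega),
    PySem.List.pyRange_one_cons (show m < 40 from h40)]
  rw [List.map_append, List.sum_append, List.map_cons, List.sum_cons]
  have hlo : ((PySem.List.pyRange 0 m).map (fun r => if (m, v) = (r, g r) then (1 : Int) else 0)).sum = 0 := by
    apply List.sum_eq_zero
    intro x hx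
    obtain ⟨r, hr, hrx⟩ := List.mem_map.1 hx
    have := (PySem.List.mem_pyRange_one).1 hr
    rw [← hrx, if_neg (by simp [Prod.ext_iff]; omega)]
  have hhi : ((PySem.List.pyRange (m + 1) 40).map (fun r => if (m, v) = (r, g r) then (1 : Int) else 0)).sum = 0 := by
    apply List.sum_eq_zero
    intro x hx
    obtain ⟨r, hr, hrx⟩ := List.mem_map.1 hx
    have := (PySem.List.mem_pyRange_one).1 hr
    rw [← hrx, if_neg (by simp [Prod.ext_iff]; omega)]
  rw [hlo, hhi]
  simp [Prod.ext_iff]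

-- summing per-residue exact-pair counts over all 40 residues counts the matching pairs once each
lemma pvSumCount (g : Int → Int) (l : List (Int × Int)) (h : ∀ q ∈ l, 0 ≤ q.1 ∧ q.1 < 40) :
    ((PySem.List.pyRange 0 40).map (fun r => (l.count (r, g r) : Int))).sum
    = (l.countP (fun q => decide (q.2 = g q.1)) : Int) := by
  induction l with
  | nil => simp
  | cons q l ih =>
    have hq := h q (List.mem_cons_self)
    have hl : ∀ p ∈ l, 0 ≤ p.1 ∧ p.1 < 40 := fun p hp => h p (List.mem_cons_of_mem _ hp)
    have hmap : ((PySem.List.pyRange 0 40).map (fun r => ((q :: l).count (r, g r) : Int)))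
        = (PySem.List.pyRange 0 40).map (fun r =>
            (l.count (r, g r) : Int) + (if (q.1, q.2) = (r, g r) then (1 : Int) else 0)) := by
      apply List.map_congr_left
      intro r _
      rw [List.count_cons]
      by_cases hqe : (q.1, q.2) = (r, g r)
      · have : ((r, g r) : Int × Int) = q := by rw [← hqe]
        simp [this]
      · have : ¬ (((r, g r) : Int × Int) = q) := by
          intro hc; exact hqe (by rw [hc])
        simp [hqe]
    rw [hmap, PySem.List.sum_map_add_int, ih hl, pvSumInd g q.1 q.2 hq.1 hq.2,
      List.countP_cons]
    by_cases hv : q.2 = g q.1 <;> simp [hv]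

-- B's score of a pattern is the number of (index, answer) pairs matching g, for any g the
-- pattern's residue-40 lookup represents
lemma pvScoreEq (answers : List Int) (table : List Int) (g : Int → Int)
    (hg : ∀ i : Int, PySem.List.pyGetD table
        (PySem.Int.mod (PySem.Int.mod i 40) (table.length : Int)) 0 = g i) :
    pvScore ((PySem.List.enumerate answers).foldl
      (fun (d : PySem.Dict (Int × Int) Int) p =>
        d.insert (PySem.Int.mod p.1 40, p.2) (d.getD (PySem.Int.mod p.1 40, p.2) 0 + 1))
      PySem.Dict.empty) table
    = ((PySem.List.enumerate answers).countP (fun p => decide (p.2 = g p.1)) : Int) := by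
  have hfold :
      (PySem.List.enumerate answers).foldl
        (fun (d : PySem.Dict (Int × Int) Int) p =>
          d.insert (PySem.Int.mod p.1 40, p.2) (d.getD (PySem.Int.mod p.1 40, p.2) 0 + 1))
        PySem.Dict.empty
      = ((PySem.List.enumerate answers).map (fun p => (PySem.Int.mod p.1 40, p.2))).foldl
        (fun (d : PySem.Dict (Int × Int) Int) x => d.insert x (d.getD x 0 + 1))
        PySem.Dict.empty := by
    rw [List.foldl_map]
  unfold pvScore
  rw [hfold]
  have hgd : ∀ v : (Int × Int),
      (((PySem.List.enumerate answers).map (fun p => (PySem.Int.mod p.1 40, p.2))).foldl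
        (fun (d : PySem.Dict (Int × Int) Int) x => d.insert x (d.getD x 0 + 1))
        PySem.Dict.empty).getD v 0
      = (((PySem.List.enumerate answers).map (fun p => (PySem.Int.mod p.1 40, p.2))).count v : Int) := by
    intro v
    rw [PySem.Dict.getD_foldl_insert_add_one, PySem.Dict.getD_empty, zero_add]
  rw [List.map_congr_left (fun r _ => hgd (r, PySem.List.pyGetD table (PySem.Int.mod r (table.length : Int)) 0))]
  rw [pvSumCount (fun r => PySem.List.pyGetD table (PySem.Int.mod r (table.length : Int)) 0)
    _ ?_]
  · rw [List.countP_map]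
    congr 1
    apply List.countP_congr
    intro p _
    simp only [Function.comp]
    rw [hg p.1]
  · intro q hq
    obtain ⟨p, _, hpq⟩ := List.mem_map.1 hq
    have hm : PySem.Int.mod p.1 40 = p.1 % 40 := PySem.Int.mod_eq_emod_of_pos (by norm_num)
    rw [← hpq]
    constructor <;> simp only [hm] <;> omega

-- the residue-40 table lookups represent A's pattern functions (periods 5, 8, 10 divide 40)
lemma pvHG1 (i : Int) :
    PySem.List.pyGetD [1, 2, 3, 4, 5] (PySem.Int.mod (PySem.Int.mod i 40) (([1, 2, 3, 4, 5] : List Int).length : Int)) 0 = pvG1 i := by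
  have h40 : PySem.Int.mod i 40 = i % 40 := PySem.Int.mod_eq_emod_of_pos (by norm_num)
  have h5 : PySem.Int.mod (i % 40) 5 = (i % 40) % 5 := PySem.Int.mod_eq_emod_of_pos (by norm_num)
  have h5' : PySem.Int.mod i 5 = i % 5 := PySem.Int.mod_eq_emod_of_pos (by norm_num)
  have hdvd : (i % 40) % 5 = i % 5 := Int.emod_emod_of_dvd i (by norm_num)
  rw [show (([1, 2, 3, 4, 5] : List Int).length : Int) = 5 from by norm_num,
    h40, h5, hdvd, ← h5', ← pvT1]
lemma pvHG2 (i : Int) :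
    PySem.List.pyGetD [2, 1, 2, 3, 2, 4, 2, 5] (PySem.Int.mod (PySem.Int.mod i 40) (([2, 1, 2, 3, 2, 4, 2, 5] : List Int).length : Int)) 0 = pvG2 i := by
  have h40 : PySem.Int.mod i 40 = i % 40 := PySem.Int.mod_eq_emod_of_pos (by norm_num)
  have h8 : PySem.Int.mod (i % 40) 8 = (i % 40) % 8 := PySem.Int.mod_eq_emod_of_pos (by norm_num)
  have h8' : PySem.Int.mod i 8 = i % 8 := PySem.Int.mod_eq_emod_of_pos (by norm_num)
  have hdvd : (i % 40) % 8 = i % 8 := Int.emod_emod_of_dvd i (by norm_num)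
  rw [show (([2, 1, 2, 3, 2, 4, 2, 5] : List Int).length : Int) = 8 from by norm_num,
    h40, h8, hdvd, ← h8', ← pvT2]
lemma pvHG3 (i : Int) :
    PySem.List.pyGetD [3, 3, 1, 1, 2, 2, 4, 4, 5, 5] (PySem.Int.mod (PySem.Int.mod i 40) (([3, 3, 1, 1, 2, 2, 4, 4, 5, 5] : List Int).length : Int)) 0 = pvG3 i := by
  have h40 : PySem.Int.mod i 40 = i % 40 := PySem.Int.mod_eq_emod_of_pos (by norm_num)
  have h10 : PySem.Int.mod (i % 40) 10 = (i % 40) % 10 := PySem.Int.mod_eq_emod_of_pos (by norm_num)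
  have h10' : PySem.Int.mod i 10 = i % 10 := PySem.Int.mod_eq_emod_of_pos (by norm_num)
  have hdvd : (i % 40) % 10 = i % 10 := Int.emod_emod_of_dvd i (by norm_num)
  rw [show (([3, 3, 1, 1, 2, 2, 4, 4, 5, 5] : List Int).length : Int) = 10 from by norm_num,
    h40, h10, hdvd, ← h10', ← pvT3]

-- A's counting loop over enumerate is the triple of match counts
lemma pvACounts (answers : List Int) :
    (PySem.List.enumerate answers).foldl (fun (c : Int × Int × Int) (p : Int × Int) =>
      (if p.2 = pvG1 p.1 then c.1 + 1 else c.1,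
       if p.2 = pvG2 p.1 then c.2.1 + 1 else c.2.1,
       if p.2 = pvG3 p.1 then c.2.2 + 1 else c.2.2)) ((0 : Int), (0 : Int), (0 : Int))
    = (((PySem.List.enumerate answers).countP (fun p => decide (p.2 = pvG1 p.1)) : Int),
       ((PySem.List.enumerate answers).countP (fun p => decide (p.2 = pvG2 p.1)) : Int),
       ((PySem.List.enumerate answers).countP (fun p => decide (p.2 = pvG3 p.1)) : Int)) := by
  rw [PySem.List.foldl_prod_mk (f := fun (a : Int) (p : Int × Int) => if p.2 = pvG1 p.1 then a + 1 else a)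
    (g := fun (b : Int × Int) (p : Int × Int) =>
      (if p.2 = pvG2 p.1 then b.1 + 1 else b.1, if p.2 = pvG3 p.1 then b.2 + 1 else b.2))]
  rw [PySem.List.foldl_prod_mk (f := fun (a : Int) (p : Int × Int) => if p.2 = pvG2 p.1 then a + 1 else a)
    (g := fun (b : Int) (p : Int × Int) => if p.2 = pvG3 p.1 then b + 1 else b)]
  rw [PySem.List.foldl_ite_add_one, PySem.List.foldl_ite_add_one, PySem.List.foldl_ite_add_one]
  simp

-- the two tail computations agree (for any reference value m and equal counts)
lemma pvFinalGen (m f s t : Int) :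
    PySem.List.sorted ((if m = f then [(1 : Int)] else []) ++
      (if m = s then [(2 : Int)] else []) ++
      (if m = t then [(3 : Int)] else [])) (fun x => x)
    = ((PySem.List.enumerate [f, s, t] 1).filter (fun p => p.2 = m)).map (·.1) := by
  by_cases hf : m = f <;> by_cases hs : m = s <;> by_cases ht : m = t <;>
    first
    | simp [PySem.List.enumerate, PySem.List.sorted, PySem.List.insertBy, hf.symm, hs.symm, ht.symm]
    | simp [PySem.List.enumerate, PySem.List.sorted, PySem.List.insertBy, hf.symm, hs.symm, ht, Ne.symm ht]
    | simp [PySem.List.enumerate, PySem.List.sorted, PySem.List.insertBy, hf.symm, hs, Ne.symm hs, ht.symm]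
    | simp [PySem.List.enumerate, PySem.List.sorted, PySem.List.insertBy, hf.symm, hs, Ne.symm hs, ht, Ne.symm ht]
    | simp [PySem.List.enumerate, PySem.List.sorted, PySem.List.insertBy, hf, Ne.symm hf, hs.symm, ht.symm]
    | simp [PySem.List.enumerate, PySem.List.sorted, PySem.List.insertBy, hf, Ne.symm hf, hs.symm, ht, Ne.symm ht]
    | simp [PySem.List.enumerate, PySem.List.sorted, PySem.List.insertBy, hf, Ne.symm hf, hs, Ne.symm hs, ht.symm]
    | simp [PySem.List.enumerate, PySem.List.sorted, hf, Ne.symm hf, hs, Ne.symm hs, ht, Ne.symm ht]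

-- ===== VERDICT (by name: the statement is the Claim_ definition above) =====
theorem solution_spec : Claim_equal_solution := by
  intro answers _
  unfold Spec_solution solution solution_alt
  dsimp only
  rw [pvBuild (((answers.length : Int) - 0).toNat) 0 (answers.length : Int) rfl [] [] []]
  simp only [List.nil_append]
  have hc :
      (PySem.List.pyRange 0 (answers.length : Int)).foldl (fun (c : Int × Int × Int) i =>
        (if PySem.List.pyGetD answers i 0 =
              PySem.List.pyGetD (List.map pvG1 (PySem.List.pyRange 0 (answers.length : Int))) i 0
          then c.1 + 1 else c.1,
         if PySem.List.pyGetD answers i 0 =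
              PySem.List.pyGetD (List.map pvG2 (PySem.List.pyRange 0 (answers.length : Int))) i 0
          then c.2.1 + 1 else c.2.1,
         if PySem.List.pyGetD answers i 0 =
              PySem.List.pyGetD (List.map pvG3 (PySem.List.pyRange 0 (answers.length : Int))) i 0
          then c.2.2 + 1 else c.2.2)) (0, 0, 0)
      = (PySem.List.enumerate answers).foldl (fun (c : Int × Int × Int) (p : Int × Int) =>
        (if p.2 = pvG1 p.1 then c.1 + 1 else c.1,
         if p.2 = pvG2 p.1 then c.2.1 + 1 else c.2.1,
         if p.2 = pvG3 p.1 then c.2.2 + 1 else c.2.2)) (0, 0, 0) := by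
    rw [PySem.List.foldl_congr_mem (PySem.List.pyRange 0 (answers.length : Int)) _
      (fun c i => (fun (c : Int × Int × Int) (p : Int × Int) =>
        (if p.2 = pvG1 p.1 then c.1 + 1 else c.1,
         if p.2 = pvG2 p.1 then c.2.1 + 1 else c.2.1,
         if p.2 = pvG3 p.1 then c.2.2 + 1 else c.2.2))
        c (i, PySem.List.pyGetD answers (i - 0) 0)) (0, 0, 0) ?hcong]
    case hcong =>
      intro acc i hi
      obtain ⟨h0, hlen⟩ := (PySem.List.mem_pyRange_one).1 hi
      dsimp only
      rw [show i = ((i.toNat : Nat) : Int) from by omega]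
      rw [PySem.List.pyGetD_map_pyRange pvG1 answers.length i.toNat 0 (by omega),
          PySem.List.pyGetD_map_pyRange pvG2 answers.length i.toNat 0 (by omega),
          PySem.List.pyGetD_map_pyRange pvG3 answers.length i.toNat 0 (by omega)]
      simp only [sub_zero]
    rw [show PySem.List.pyRange 0 (answers.length : Int)
        = PySem.List.pyRange 0 (0 + (answers.length : Int)) from by rw [zero_add]]
    exact pvEnumFold answers 0 (fun (c : Int × Int × Int) (p : Int × Int) =>
      (if p.2 = pvG1 p.1 then c.1 + 1 else c.1,
       if p.2 = pvG2 p.1 then c.2.1 + 1 else c.2.1,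
       if p.2 = pvG3 p.1 then c.2.2 + 1 else c.2.2)) (0, 0, 0)
  have hs :
      (((PySem.List.enumerate answers).countP (fun p => decide (p.2 = pvG1 p.1)) : Int),
       ((PySem.List.enumerate answers).countP (fun p => decide (p.2 = pvG2 p.1)) : Int),
       ((PySem.List.enumerate answers).countP (fun p => decide (p.2 = pvG3 p.1)) : Int))
      = (pvScore ((PySem.List.enumerate answers).foldl
          (fun (d : PySem.Dict (Int × Int) Int) p =>
            d.insert (PySem.Int.mod p.1 40, p.2) (d.getD (PySem.Int.mod p.1 40, p.2) 0 + 1))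
          PySem.Dict.empty) [1, 2, 3, 4, 5],
         pvScore ((PySem.List.enumerate answers).foldl
          (fun (d : PySem.Dict (Int × Int) Int) p =>
            d.insert (PySem.Int.mod p.1 40, p.2) (d.getD (PySem.Int.mod p.1 40, p.2) 0 + 1))
          PySem.Dict.empty) [2, 1, 2, 3, 2, 4, 2, 5],
         pvScore ((PySem.List.enumerate answers).foldl
          (fun (d : PySem.Dict (Int × Int) Int) p =>
            d.insert (PySem.Int.mod p.1 40, p.2) (d.getD (PySem.Int.mod p.1 40, p.2) 0 + 1))
          PySem.Dict.empty) [3, 3, 1, 1, 2, 2, 4, 4, 5, 5]) := by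
    rw [pvScoreEq answers [1, 2, 3, 4, 5] pvG1 pvHG1,
        pvScoreEq answers [2, 1, 2, 3, 2, 4, 2, 5] pvG2 pvHG2,
        pvScoreEq answers [3, 3, 1, 1, 2, 2, 4, 4, 5, 5] pvG3 pvHG3]
  exact (pvFinalGen _ _ _ _).trans
    (congrArg (fun c : Int × Int × Int =>
      ((PySem.List.enumerate [c.1, c.2.1, c.2.2] 1).filter
        (fun p => p.2 = max (max c.1 c.2.1) c.2.2)).map (·.1))
      ((hc.trans (pvACounts answers)).trans hs))
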